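-- pv_equiv track=rewrite | github.com/AboMedoz/Virtual-Whiteboard | src/helpers.py | check_palette_selection
-- ===== SOURCE A (Python) =====
-- def check_palette_selection(x, y, colors, box_size=50, padding=10, frame_width=1280):
--     total_width = len(colors) * (box_size + padding) - padding
--     start_x = (frame_width - total_width) // 2
--     top_y = 10
--     for i, color in enumerate(colors):
--         bx = start_x + i * (box_size + padding)
--         if bx <= x <= bx + box_size and top_y <= y <= top_y + box_size:
--             return color
--     return None
-- ===== SOURCE B (Python) =====
-- def check_palette_selection(x, y, colors, box_size=50, padding=10, frame_width=1280):
--     if not colors or not (10 <= y <= 10 + box_size):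
--         return None
--     step = box_size + padding
--     start_x = (frame_width - (len(colors) * step - padding)) // 2
--     d = x - start_x
--     # leftmost box index i with i*step <= d <= i*step + box_size,
--     # i.e. ceil((d - box_size) / step), clamped to 0
--     i = max(0, -((box_size - d) // step))
--     if i < len(colors) and i * step <= d <= i * step + box_size:
--         return colors[i]
--     return None
-- ===== Notes on version B (the rewrite author's own statement) =====
-- stated objective: alternative
-- what changed: B replaces A's linear scan over the palette boxes by direct arithmetic: it computes the leftmost candidate box index by a ceiling division by the box stride (clamped at 0) and does one bounds check; Pre_ restricts to a positive box stride (box_size + padding > 0), the natural palette geometry - with a non-positive stride A's values on the degenerate, coinciding or right-to-left layout are accidental and B's division is undefined at stride 0.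
-- outside the precondition, e.g. on check_palette_selection(640, 10, [(1,), (2,)], 0, 0, 1280): A returns (1,), B raises ZeroDivisionError; on check_palette_selection(600, 10, [(1,), (2,)], 50, -100, 1280): A returns (2,), B returns None
import Mathlib
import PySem

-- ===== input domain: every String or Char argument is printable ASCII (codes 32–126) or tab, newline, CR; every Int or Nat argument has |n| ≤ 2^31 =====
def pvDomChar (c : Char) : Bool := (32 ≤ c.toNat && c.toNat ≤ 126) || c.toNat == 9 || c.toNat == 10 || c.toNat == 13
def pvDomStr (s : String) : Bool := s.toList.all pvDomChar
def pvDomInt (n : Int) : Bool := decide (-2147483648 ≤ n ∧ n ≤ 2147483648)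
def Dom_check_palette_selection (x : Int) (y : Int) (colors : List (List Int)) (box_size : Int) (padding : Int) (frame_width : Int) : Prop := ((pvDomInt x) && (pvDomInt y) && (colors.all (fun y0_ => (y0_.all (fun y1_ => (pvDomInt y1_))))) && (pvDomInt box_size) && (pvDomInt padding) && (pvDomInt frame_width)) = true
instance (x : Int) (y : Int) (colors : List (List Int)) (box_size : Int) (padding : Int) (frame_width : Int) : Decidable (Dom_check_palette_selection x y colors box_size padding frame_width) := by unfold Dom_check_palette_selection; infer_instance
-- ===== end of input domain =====

-- B replaces A's linear scan over the palette boxes by a direct arithmetic computation of the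
-- leftmost candidate box index (ceiling division by the box stride, clamped at 0) plus one bounds check.

-- ===== PORT A =====
-- the 'for i, color in enumerate(colors): … return color / return None' loop
def cpsLoop (x y box_size start_x step : Int) : List (List Int) → Int → Option (List Int)
  | [], _ => none
  | color :: rest, i =>
    let bx := start_x + i * step
    if bx ≤ x ∧ x ≤ bx + box_size ∧ 10 ≤ y ∧ y ≤ 10 + box_size
    then some color
    else cpsLoop x y box_size start_x step rest (i + 1)

def check_palette_selection (x : Int) (y : Int) (colors : List (List Int)) (box_size : Int) (padding : Int) (frame_width : Int) : Option (List Int) :=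
  let total_width : Int := (colors.length : Int) * (box_size + padding) - padding
  let start_x := PySem.Int.floordiv (frame_width - total_width) 2
  cpsLoop x y box_size start_x (box_size + padding) colors 0

-- ===== PORT B =====
def check_palette_selection_alt (x : Int) (y : Int) (colors : List (List Int)) (box_size : Int) (padding : Int) (frame_width : Int) : Option (List Int) :=
  if colors.length = 0 ∨ ¬ (10 ≤ y ∧ y ≤ 10 + box_size) then none
  else
    let step := box_size + padding
    let start_x := PySem.Int.floordiv (frame_width - ((colors.length : Int) * step - padding)) 2
    let d := x - start_x
    let i : Int := max 0 (-(PySem.Int.floordiv (box_size - d) step))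
    if i < (colors.length : Int) ∧ i * step ≤ d ∧ d ≤ i * step + box_size
    then PySem.List.pyGet? colors i
    else none

-- ===== PRECONDITION & SPEC =====
-- Pre_ restricts to the natural palette geometry: a positive box stride (box_size + padding > 0).
-- With a non-positive stride the layout is degenerate (all boxes coincide, or run right to left);
-- A still returns a value there as an accident of its scan, while B's division is undefined at stride 0.
def Pre_check_palette_selection (x : Int) (y : Int) (colors : List (List Int)) (box_size : Int) (padding : Int) (frame_width : Int) : Prop :=
  -padding < box_size
instance (x : Int) (y : Int) (colors : List (List Int)) (box_size : Int) (padding : Int) (frame_width : Int) : Decidable (Pre_check_palette_selection x y colors box_size padding frame_width) := by unfold Pre_check_palette_selection; infer_instance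

def pvWitness_check_palette_selection : Int × Int × List (List Int) × Int × Int × Int := (630, 20, [[255, 0, 0], [0, 255, 0]], 50, 10, 1280)

def Spec_check_palette_selection (x : Int) (y : Int) (colors : List (List Int)) (box_size : Int) (padding : Int) (frame_width : Int) (out : Option (List Int)) : Prop := out = check_palette_selection_alt x y colors box_size padding frame_width
instance (x : Int) (y : Int) (colors : List (List Int)) (box_size : Int) (padding : Int) (frame_width : Int) (out : Option (List Int)) : Decidable (Spec_check_palette_selection x y colors box_size padding frame_width out) := by unfold Spec_check_palette_selection; infer_instance

-- ===== CLAIM (what is proved, stated in full; the proofs are below) =====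
def Claim_equal_check_palette_selection : Prop := ∀ (x : Int) (y : Int) (colors : List (List Int)) (box_size : Int) (padding : Int) (frame_width : Int), Dom_check_palette_selection x y colors box_size padding frame_width → Pre_check_palette_selection x y colors box_size padding frame_width → Spec_check_palette_selection x y colors box_size padding frame_width (check_palette_selection x y colors box_size padding frame_width)

-- ===== LEMMAS AND PROOFS =====

-- the loop returns none when no index in range matches
lemma cpsLoop_none (x y bs sx st : Int) :
    ∀ (l : List (List Int)) (i0 : Int),
      (∀ j : Int, i0 ≤ j → j < i0 + l.length →
        ¬ (sx + j * st ≤ x ∧ x ≤ sx + j * st + bs ∧ 10 ≤ y ∧ y ≤ 10 + bs)) →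
      cpsLoop x y bs sx st l i0 = none := by
  intro l
  induction l with
  | nil => intro i0 _; simp [cpsLoop]
  | cons c rest ih =>
    intro i0 h
    simp only [cpsLoop]
    rw [if_neg (h i0 le_rfl (by simp))]
    exact ih (i0 + 1) (fun j hj1 hj2 => h j (by omega) (by simp at hj2 ⊢; omega))

-- the loop returns element k when k is the first matching index
lemma cpsLoop_hit (x y bs sx st : Int) :
    ∀ (l : List (List Int)) (i0 k : Int),
      i0 ≤ k → k < i0 + l.length →
      (sx + k * st ≤ x ∧ x ≤ sx + k * st + bs ∧ 10 ≤ y ∧ y ≤ 10 + bs) →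
      (∀ j : Int, i0 ≤ j → j < k →
        ¬ (sx + j * st ≤ x ∧ x ≤ sx + j * st + bs ∧ 10 ≤ y ∧ y ≤ 10 + bs)) →
      cpsLoop x y bs sx st l i0 = PySem.List.pyGet? l (k - i0) := by
  intro l
  induction l with
  | nil => intro i0 k h1 h2 _ _; simp at h2; omega
  | cons c rest ih =>
    intro i0 k h1 h2 hk hmin
    simp only [cpsLoop]
    by_cases h0 : sx + i0 * st ≤ x ∧ x ≤ sx + i0 * st + bs ∧ 10 ≤ y ∧ y ≤ 10 + bs
    · rw [if_pos h0]
      have hki : k = i0 := by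
        by_contra hne
        exact hmin i0 le_rfl (by omega) h0
      rw [hki, sub_self]
      exact (PySem.List.pyGet?_zero_cons c rest).symm
    · rw [if_neg h0]
      have hki : i0 < k := by
        rcases lt_or_eq_of_le h1 with h | h
        · exact h
        · exact absurd (h ▸ hk) h0
      rw [ih (i0 + 1) k (by omega) (by simp at h2 ⊢; omega) hk
            (fun j hj1 hj2 => hmin j (by omega) hj2)]
      obtain ⟨m, hm⟩ : ∃ m : Nat, k - i0 = (m : Int) + 1 :=
        ⟨(k - i0 - 1).toNat, by omega⟩
      rw [hm, PySem.List.pyGet?_cons_succ]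
      congr 1
      omega

-- ceiling division: -((-u) // t) ≤ j ↔ u ≤ j * t  (t > 0)
lemma ceil_le_iff {u t : Int} (j : Int) (ht : 0 < t) :
    -(PySem.Int.floordiv (-u) t) ≤ j ↔ u ≤ j * t := by
  rw [neg_le, PySem.Int.le_floordiv_iff_mul_le ht, neg_mul, neg_le_neg_iff]

-- the loop equals "check the single candidate index i", given that i is ≥ 0,
-- no smaller index matches, and any match at j ≥ i forces a match at i
lemma loop_eq_arith (x y bs st sx i : Int) (colors : List (List Int))
    (hy : 10 ≤ y ∧ y ≤ 10 + bs)
    (h0 : 0 ≤ i)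
    (hmin : ∀ j : Int, 0 ≤ j → j < i → ¬ (j * st ≤ x - sx ∧ x - sx ≤ j * st + bs))
    (hmono : ∀ j : Int, i ≤ j → (j * st ≤ x - sx ∧ x - sx ≤ j * st + bs) →
      (i * st ≤ x - sx ∧ x - sx ≤ i * st + bs)) :
    cpsLoop x y bs sx st colors 0 =
      if i < (colors.length : Int) ∧ i * st ≤ x - sx ∧ x - sx ≤ i * st + bs
      then PySem.List.pyGet? colors i
      else none := by
  by_cases hchk : i < (colors.length : Int) ∧ i * st ≤ x - sx ∧ x - sx ≤ i * st + bs
  · rw [if_pos hchk]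
    rw [cpsLoop_hit x y bs sx st colors 0 i h0 (by omega)
          ⟨by omega, by omega, hy.1, hy.2⟩
          (fun j hj1 hj2 h => hmin j hj1 hj2 ⟨by omega, by omega⟩)]
    rw [sub_zero]
  · rw [if_neg hchk]
    apply cpsLoop_none
    intro j hj1 hj2 hC
    have hpj : j * st ≤ x - sx ∧ x - sx ≤ j * st + bs := ⟨by omega, by omega⟩
    have hji : i ≤ j := by
      by_contra h
      exact hmin j hj1 (by omega) hpj
    have hpi := hmono j hji hpj
    exact hchk ⟨by omega, hpi⟩

-- ===== VERDICT (by name: the statement is the Claim_ definition above) =====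
theorem check_palette_selection_spec : Claim_equal_check_palette_selection := by
  intro x y colors bs pad fw _ hpre
  unfold Pre_check_palette_selection at hpre
  replace hpre : 0 < bs + pad := by omega
  unfold Spec_check_palette_selection check_palette_selection check_palette_selection_alt
  simp only []
  set n : Int := (colors.length : Int) with hn
  set st : Int := bs + pad with hst
  set sx : Int := PySem.Int.floordiv (fw - (n * st - pad)) 2 with hsx
  by_cases hearly : colors.length = 0 ∨ ¬ (10 ≤ y ∧ y ≤ 10 + bs)
  · rw [if_pos hearly]
    rcases hearly with h | h
    · have hcn : colors = [] := List.length_eq_zero_iff.mp h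
      subst hcn; simp [cpsLoop]
    · exact cpsLoop_none x y bs sx st colors 0 (fun j _ _ hC => h ⟨hC.2.2.1, hC.2.2.2⟩)
  · rw [if_neg hearly]
    push_neg at hearly
    obtain ⟨_, hy⟩ := hearly
    have hkey : ∀ j : Int, -(PySem.Int.floordiv (bs - (x - sx)) st) ≤ j ↔
        (x - sx) - bs ≤ j * st := by
      intro j
      have h := ceil_le_iff (u := (x - sx) - bs) (t := st) j hpre
      rwa [neg_sub] at h
    refine loop_eq_arith x y bs st sx _ colors hy (le_max_left 0 _) ?_ ?_
    · intro j hj1 hj2 hp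
      have h2 : -(PySem.Int.floordiv (bs - (x - sx)) st) ≤ j := (hkey j).mpr (by omega)
      omega
    · intro j hji hpj
      have h1 : (x - sx) - bs ≤ (max 0 (-(PySem.Int.floordiv (bs - (x - sx)) st))) * st :=
        (hkey _).mp (le_max_right 0 _)
      have h2 : (max 0 (-(PySem.Int.floordiv (bs - (x - sx)) st))) * st ≤ j * st :=
        mul_le_mul_of_nonneg_right hji (le_of_lt hpre)
      exact ⟨by omega, by omega⟩
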